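-- pv_equiv track=rewrite | github.com/liamcal/aoc | 23/08/solver.py | walk_network
-- ===== SOURCE A (Python) =====
-- from math import lcm
--
-- def walk_network(sequence, network, start_positions):
--     i = 0
--     done = []
--     positions = start_positions
--     while True:
--         cur_instruction = sequence[i % len(sequence)]
--         next_positions = []
--         for position in positions:
--             next_position = network[position][cur_instruction]
--             if next_position[-1] == 'Z':
--                 done.append(i + 1)
--             else:
--                 next_positions.append(next_position)
--
--         if next_positions:
--             positions = next_positions
--         else:
--             break
--         i += 1
--     ans = lcm(*done)
--     return ans
-- ===== SOURCE B (Python) =====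
-- from math import lcm
--
--
-- def walk_network(sequence, network, start_positions):
--     # Run each ghost to completion independently (its hitting time does not
--     # depend on the other ghosts), instead of advancing all of them in lockstep.
--     done = []
--     for start in start_positions:
--         pos = start
--         j = 0
--         while True:
--             pos = network[pos][sequence[j % len(sequence)]]
--             j += 1
--             if pos[-1] == 'Z':
--                 break
--         done.append(j)
--     return lcm(*done)
-- ===== Notes on version B (the rewrite author's own statement) =====
-- stated objective: simpler
-- what changed: Replaces the lockstep loop that advances a shrinking list of live ghosts under one shared step counter (rebuilding next_positions every step) with an independent sequential run per ghost, keeping just a scalar position and private counter, then lcm of the collected hitting times.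
import Mathlib
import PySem

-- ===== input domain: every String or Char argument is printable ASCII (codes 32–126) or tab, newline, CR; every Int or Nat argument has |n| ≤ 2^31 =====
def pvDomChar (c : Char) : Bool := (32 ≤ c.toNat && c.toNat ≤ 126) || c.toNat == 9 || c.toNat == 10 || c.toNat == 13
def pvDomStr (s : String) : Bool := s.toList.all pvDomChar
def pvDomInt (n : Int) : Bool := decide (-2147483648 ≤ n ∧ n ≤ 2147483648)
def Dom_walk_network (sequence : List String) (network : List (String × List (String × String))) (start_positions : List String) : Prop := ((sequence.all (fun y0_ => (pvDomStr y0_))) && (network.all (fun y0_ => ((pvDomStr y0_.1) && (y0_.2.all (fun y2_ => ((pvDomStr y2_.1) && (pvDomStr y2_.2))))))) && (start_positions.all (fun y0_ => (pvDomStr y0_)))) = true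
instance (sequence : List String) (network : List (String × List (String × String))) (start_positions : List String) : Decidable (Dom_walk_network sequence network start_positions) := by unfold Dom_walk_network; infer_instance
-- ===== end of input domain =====

-- B runs each ghost to completion independently (one scalar position and a private
-- step counter per ghost) instead of A's lockstep advance of a shrinking list of
-- live ghosts under one shared counter; same hitting times, same lcm.

-- dict lookup on an association list (first match), shared by both ports
def pvLookup {α : Type} (l : List (String × α)) (k : String) : Option α :=
  match l with
  | [] => none
  | (k', v) :: t => if k' == k then some v else pvLookup t k

-- fuel that suffices for every terminating run: a ghost's state is (position, step mod len(sequence));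
-- positions after a move are values of the network, so a hit, if any, occurs within values*len+1 steps
def pvFuel (sequence : List String) (network : List (String × List (String × String))) : Nat :=
  (network.flatMap (fun r => r.2)).length * sequence.length + 1

-- ===== PORT A =====
-- one round of A's while-loop body: the 'for position in positions' loop (none = Python raises)
def pvRoundA (network : List (String × List (String × String))) (instr : String) (i : Nat) :
    List String → List Int → List String → Option (List Int × List String)
  | [], done, next => some (done, next)
  | position :: rest, done, next =>
    match pvLookup network position with
    | none => none
    | some row =>
      match pvLookup row instr with
      | none => none
      | some np =>
        match PySem.Str.pyGet? np (-1) with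
        | none => none
        | some c =>
          if c = 'Z' then pvRoundA network instr i rest (done ++ [(i : Int) + 1]) next
          else pvRoundA network instr i rest done (next ++ [np])

-- A's 'while True' loop (fuel-totalized; none = raise or out of fuel)
def pvLoopA (sequence : List String) (network : List (String × List (String × String))) :
    Nat → Nat → List Int → List String → Option (List Int)
  | 0, _, _, _ => none
  | fuel+1, i, done, positions =>
    match PySem.List.pyGet? sequence ((i % sequence.length : Nat) : Int) with
    | none => none
    | some instr =>
      match pvRoundA network instr i positions done [] with
      | none => none
      | some (done', next) =>
        if next = [] then some done'
        else pvLoopA sequence network fuel (i + 1) done' next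

def walk_network (sequence : List String) (network : List (String × List (String × String))) (start_positions : List String) : Int :=
  match pvLoopA sequence network (pvFuel sequence network) 0 [] start_positions with
  | none => 0
  | some done => done.foldl (fun a b => ((Int.lcm a b : Nat) : Int)) 1

-- ===== PORT B =====
-- B's inner 'while True' loop for one ghost: position pos, private counter j (fuel-totalized)
def pvGhostB (sequence : List String) (network : List (String × List (String × String))) :
    Nat → String → Nat → Option Nat
  | 0, _, _ => none
  | fuel+1, pos, j =>
    match PySem.List.pyGet? sequence ((j % sequence.length : Nat) : Int) with
    | none => none
    | some instr =>
      match pvLookup network pos with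
      | none => none
      | some row =>
        match pvLookup row instr with
        | none => none
        | some np =>
          match PySem.Str.pyGet? np (-1) with
          | none => none
          | some c => if c = 'Z' then some (j + 1) else pvGhostB sequence network fuel np (j + 1)

-- B's 'for start in start_positions' loop, appending each ghost's hitting time to done
def pvRunAllB (sequence : List String) (network : List (String × List (String × String))) (fuel : Nat) :
    List String → List Nat → Option (List Nat)
  | [], done => some done
  | s :: rest, done =>
    match pvGhostB sequence network fuel s 0 with
    | none => none
    | some j => pvRunAllB sequence network fuel rest (done ++ [j])

def walk_network_alt (sequence : List String) (network : List (String × List (String × String))) (start_positions : List String) : Int :=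
  match pvRunAllB sequence network (pvFuel sequence network) start_positions [] with
  | none => 0
  | some done => done.foldl (fun a (j : Nat) => ((Int.lcm a (j : Int) : Nat) : Int)) 1

-- ===== PRECONDITION & SPEC =====
-- trajectory of one ghost (specification helpers for Pre_, not used by the ports):
-- pvStepT k p = the node reached from p at step k; pvPosAt s k = position after k steps;
-- pvLastAt s k = last character of the node reached by step k+1 (none = undefined / Python raises)
def pvStepT (sequence : List String) (network : List (String × List (String × String))) (k : Nat) (p : String) : Option String :=
  match PySem.List.pyGet? sequence ((k % sequence.length : Nat) : Int) with
  | none => none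
  | some instr =>
    match (network.find? (fun r => r.1 == p)).map (fun r => r.2) with
    | none => none
    | some row => (row.find? (fun e => e.1 == instr)).map (fun e => e.2)

def pvPosAt (sequence : List String) (network : List (String × List (String × String))) (s : String) (k : Nat) : Option String :=
  (List.range k).foldl (fun acc j => acc.bind (pvStepT sequence network j)) (some s)

def pvLastAt (sequence : List String) (network : List (String × List (String × String))) (s : String) (k : Nat) : Option Char :=
  match pvPosAt sequence network s (k + 1) with
  | none => none
  | some p => PySem.Str.pyGet? p (-1)

-- Pre_: the inputs on which Python A returns: the sequence is nonempty and every ghost's walk is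
-- defined (all lookups succeed, no empty intermediate node) and first reaches a node ending in 'Z'
-- at some step n < pvFuel (any terminating run hits within that bound, by pigeonhole on the
-- (position, step mod len(sequence)) states).
def Pre_walk_network (sequence : List String) (network : List (String × List (String × String))) (start_positions : List String) : Prop :=
  sequence ≠ [] ∧ ∀ s ∈ start_positions, ∃ n, n < pvFuel sequence network ∧
    pvLastAt sequence network s n = some 'Z' ∧
    ∀ k, k < n → (pvLastAt sequence network s k).isSome ∧ pvLastAt sequence network s k ≠ some 'Z'
instance (sequence : List String) (network : List (String × List (String × String))) (start_positions : List String) : Decidable (Pre_walk_network sequence network start_positions) := by unfold Pre_walk_network; infer_instance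

def pvWitness_walk_network : List String × (List (String × List (String × String))) × List String :=
  (["L", "R"], [("AA", [("L", "AB"), ("R", "AA")]), ("AB", [("L", "AA"), ("R", "AZ")]), ("AZ", [("L", "AZ"), ("R", "AZ")])], ["AA", "AB"])

def Spec_walk_network (sequence : List String) (network : List (String × List (String × String))) (start_positions : List String) (out : Int) : Prop := out = walk_network_alt sequence network start_positions
instance (sequence : List String) (network : List (String × List (String × String))) (start_positions : List String) (out : Int) : Decidable (Spec_walk_network sequence network start_positions out) := by unfold Spec_walk_network; infer_instance

-- ===== CLAIM (what is proved, stated in full; the proofs are below) =====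
def Claim_equal_walk_network : Prop := ∀ (sequence : List String) (network : List (String × List (String × String))) (start_positions : List String), Dom_walk_network sequence network start_positions → Pre_walk_network sequence network start_positions → Spec_walk_network sequence network start_positions (walk_network sequence network start_positions)

-- ===== LEMMAS AND PROOFS =====

theorem pv_lcmf_left_comm (c a b : Int) :
    ((Int.lcm ((Int.lcm c a : Nat) : Int) b : Nat) : Int) = ((Int.lcm ((Int.lcm c b : Nat) : Int) a : Nat) : Int) := by
  simp only [Int.lcm, Int.natAbs_natCast]
  rw [Nat.lcm_assoc, Nat.lcm_comm a.natAbs, ← Nat.lcm_assoc]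

theorem pv_foldl_lcm_perm {l₁ l₂ : List Int} (h : l₁.Perm l₂) (a : Int) :
    l₁.foldl (fun a b => ((Int.lcm a b : Nat) : Int)) a = l₂.foldl (fun a b => ((Int.lcm a b : Nat) : Int)) a := by
  induction h generalizing a with
  | nil => rfl
  | cons x _ ih => simp only [List.foldl_cons]; exact ih _
  | swap x y l =>
      simp only [List.foldl_cons]
      rw [pv_lcmf_left_comm]
  | trans _ _ ih₁ ih₂ => exact (ih₁ a).trans (ih₂ a)

theorem pvRoundA_spec (sequence : List String) (network : List (String × List (String × String)))
    (instr : String) (i f : Nat)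
    (hinstr : PySem.List.pyGet? sequence ((i % sequence.length : Nat) : Int) = some instr) :
    ∀ (ps : List String) (done : List Int) (next : List String),
      (∀ p ∈ ps, (pvGhostB sequence network (f + 1) p i).isSome) →
      ∃ dz nxt, pvRoundA network instr i ps done next = some (done ++ dz, next ++ nxt) ∧
        (∀ q ∈ nxt, (pvGhostB sequence network f q (i + 1)).isSome) ∧
        (dz ++ nxt.map (fun q => (((pvGhostB sequence network f q (i + 1)).getD 0 : Nat) : Int))).Perm
          (ps.map (fun p => (((pvGhostB sequence network (f + 1) p i).getD 0 : Nat) : Int))) := by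
  intro ps
  induction ps with
  | nil =>
      intro done next _
      exact ⟨[], [], by simp [pvRoundA], by simp, by simp⟩
  | cons p rest ih =>
      intro done next h
      have hinstr' : PySem.List.pyGet? sequence ((i : Int) % (sequence.length : Int)) = some instr := by
        rw [← Int.natCast_mod]; exact hinstr
      have hp := h p (by simp)
      cases hrow : pvLookup network p with
      | none => simp [pvGhostB, hinstr', hrow] at hp
      | some row =>
        cases hnp : pvLookup row instr with
        | none => simp [pvGhostB, hinstr', hrow, hnp] at hp
        | some np =>
          cases hc : PySem.Str.pyGet? np (-1) with
          | none =>
              have hc' : PySem.List.pyGet? np.toList (-1) = none := by simpa using hc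
              simp [pvGhostB, hinstr', hrow, hnp, hc'] at hp
          | some c =>
            have hval : pvGhostB sequence network (f + 1) p i =
                (if c = 'Z' then some (i + 1) else pvGhostB sequence network f np (i + 1)) := by
              simp only [pvGhostB, hinstr, hrow, hnp, hc]
            by_cases hz : c = 'Z'
            · obtain ⟨dz₁, nxt₁, heq, hsome, hperm⟩ :=
                ih (done ++ [(i : Int) + 1]) next (fun q hq => h q (by simp [hq]))
              refine ⟨((i : Int) + 1) :: dz₁, nxt₁, ?_, hsome, ?_⟩
              · simp only [pvRoundA, hrow, hnp, hc, if_pos hz, heq]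
                simp
              · simp only [List.map_cons, hval, if_pos hz, Option.getD_some]
                have := hperm.cons ((i : Int) + 1)
                simpa using this
            · have hpm : (pvGhostB sequence network f np (i + 1)).isSome := by
                rw [hval, if_neg hz] at hp; exact hp
              obtain ⟨dz₁, nxt₁, heq, hsome, hperm⟩ :=
                ih done (next ++ [np]) (fun q hq => h q (by simp [hq]))
              refine ⟨dz₁, np :: nxt₁, ?_, ?_, ?_⟩
              · simp only [pvRoundA, hrow, hnp, hc, if_neg hz, heq]
                simp
              · intro q hq
                rcases List.mem_cons.mp hq with rfl | hq
                · exact hpm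
                · exact hsome q hq
              · simp only [List.map_cons, hval, if_neg hz]
                exact List.perm_middle.trans (hperm.cons _)

theorem pvLoopA_spec (sequence : List String) (network : List (String × List (String × String)))
    (hseq : sequence ≠ []) :
    ∀ (f i : Nat) (done : List Int) (ps : List String),
      (∀ p ∈ ps, (pvGhostB sequence network (f + 1) p i).isSome) →
      ∃ l, pvLoopA sequence network (f + 1) i done ps = some l ∧
        l.Perm (done ++ ps.map (fun p => (((pvGhostB sequence network (f + 1) p i).getD 0 : Nat) : Int))) := by
  intro f
  induction f with
  | zero =>
      intro i done ps h
      have hlt : i % sequence.length < sequence.length :=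
        Nat.mod_lt _ (List.length_pos_iff.mpr hseq)
      have hinstr : PySem.List.pyGet? sequence ((i % sequence.length : Nat) : Int) =
          some sequence[i % sequence.length] := by
        rw [PySem.List.pyGet?_natCast]; exact List.getElem?_eq_getElem hlt
      obtain ⟨dz, nxt, heq, hsome, hperm⟩ := pvRoundA_spec sequence network _ i 0 hinstr ps done [] h
      have hnxt : nxt = [] := by
        cases nxt with
        | nil => rfl
        | cons q t => have := hsome q (by simp); simp [pvGhostB] at this
      subst hnxt
      refine ⟨done ++ dz, ?_, ?_⟩
      · simp only [pvLoopA, hinstr, heq]; simp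
      · simp only [List.map_nil, List.append_nil] at hperm
        exact hperm.append_left done
  | succ f ih =>
      intro i done ps h
      have hlt : i % sequence.length < sequence.length :=
        Nat.mod_lt _ (List.length_pos_iff.mpr hseq)
      have hinstr : PySem.List.pyGet? sequence ((i % sequence.length : Nat) : Int) =
          some sequence[i % sequence.length] := by
        rw [PySem.List.pyGet?_natCast]; exact List.getElem?_eq_getElem hlt
      obtain ⟨dz, nxt, heq, hsome, hperm⟩ :=
        pvRoundA_spec sequence network _ i (f + 1) hinstr ps done [] h
      by_cases hnxt : nxt = []
      · subst hnxt
        refine ⟨done ++ dz, ?_, ?_⟩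
        · simp only [pvLoopA, hinstr, heq]; simp
        · simp only [List.map_nil, List.append_nil] at hperm
          exact hperm.append_left done
      · obtain ⟨l, hl, hlperm⟩ := ih (i + 1) (done ++ dz) nxt hsome
        refine ⟨l, ?_, ?_⟩
        · have hstep : pvLoopA sequence network (f + 1 + 1) i done ps =
              (if nxt = [] then some (done ++ dz)
               else pvLoopA sequence network (f + 1) (i + 1) (done ++ dz) nxt) := by
            simp only [pvLoopA, hinstr, heq, List.nil_append]
          rw [hstep, if_neg hnxt]; exact hl
        · refine hlperm.trans ?_
          rw [List.append_assoc]
          exact (hperm.append_left done)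

theorem pvRunAllB_spec (sequence : List String) (network : List (String × List (String × String))) (F : Nat) :
    ∀ (rest : List String) (done : List Nat),
      (∀ s ∈ rest, (pvGhostB sequence network F s 0).isSome) →
      pvRunAllB sequence network F rest done =
        some (done ++ rest.map (fun s => (pvGhostB sequence network F s 0).getD 0)) := by
  intro rest
  induction rest with
  | nil => intro done _; simp [pvRunAllB]
  | cons s t ih =>
      intro done h
      have hs := h s (by simp)
      cases hg : pvGhostB sequence network F s 0 with
      | none => rw [hg] at hs; simp at hs
      | some j =>
          simp only [pvRunAllB, hg, ih (done ++ [j]) (fun q hq => h q (by simp [hq]))]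
          simp [hg]

theorem pvPosAt_succ (sequence : List String) (network : List (String × List (String × String)))
    (s : String) (k : Nat) :
    pvPosAt sequence network s (k + 1) = (pvPosAt sequence network s k).bind (pvStepT sequence network k) := by
  unfold pvPosAt
  rw [List.range_succ, List.foldl_append]
  rfl

theorem pv_find_eq_lookup {α : Type} (l : List (String × α)) (k : String) :
    (l.find? (fun r => r.1 == k)).map (fun r => r.2) = pvLookup l k := by
  induction l with
  | nil => rfl
  | cons hd t ih =>
      rw [List.find?_cons, pvLookup]
      by_cases hk : hd.1 == k
      · simp [hk]
      · simp only [hk, Bool.false_eq_true, if_false, cond_false]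
        exact ih

theorem pvStepT_inv (sequence : List String) (network : List (String × List (String × String)))
    (j : Nat) (p q : String) (h : pvStepT sequence network j p = some q) :
    ∃ instr row, PySem.List.pyGet? sequence ((j % sequence.length : Nat) : Int) = some instr ∧
      pvLookup network p = some row ∧ pvLookup row instr = some q := by
  unfold pvStepT at h
  split at h
  next => exact absurd h (by simp)
  next instr hg =>
    split at h
    next => exact absurd h (by simp)
    next row hrow =>
      rw [pv_find_eq_lookup] at hrow h
      exact ⟨instr, row, hg, hrow, h⟩

theorem pvLastAt_inv (sequence : List String) (network : List (String × List (String × String)))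
    (s : String) (j : Nat) (p : String) (c : Char)
    (hpos : pvPosAt sequence network s j = some p)
    (h : pvLastAt sequence network s j = some c) :
    ∃ q, pvStepT sequence network j p = some q ∧ pvPosAt sequence network s (j + 1) = some q ∧
      PySem.Str.pyGet? q (-1) = some c := by
  have hp1 : pvPosAt sequence network s (j + 1) = pvStepT sequence network j p := by
    rw [pvPosAt_succ, hpos]; rfl
  unfold pvLastAt at h
  rw [hp1] at h
  split at h
  next => exact absurd h (by simp)
  next q hq => exact ⟨q, hq, hp1.trans hq, h⟩

theorem pvGhostB_of_hits (sequence : List String) (network : List (String × List (String × String))) (s : String) :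
    ∀ (d j f : Nat) (p : String), d < f →
      pvPosAt sequence network s j = some p →
      pvLastAt sequence network s (j + d) = some 'Z' →
      (∀ k, j ≤ k → k < j + d →
        (pvLastAt sequence network s k).isSome ∧ pvLastAt sequence network s k ≠ some 'Z') →
      pvGhostB sequence network f p j = some (j + d + 1) := by
  intro d
  induction d with
  | zero =>
      intro j f p hf hpos hz _
      obtain ⟨f', rfl⟩ : ∃ f', f = f' + 1 := ⟨f - 1, by omega⟩
      rw [Nat.add_zero] at hz
      obtain ⟨q, hq, hp1, hlast⟩ := pvLastAt_inv sequence network s j p 'Z' hpos hz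
      obtain ⟨instr, row, hg, hrow, hnp⟩ := pvStepT_inv sequence network j p q hq
      simp only [pvGhostB, hg, hrow, hnp, hlast]
      simp
  | succ d ih =>
      intro j f p hf hpos hz hks
      obtain ⟨f', rfl⟩ : ∃ f', f = f' + 1 := ⟨f - 1, by omega⟩
      have hk0 := hks j le_rfl (by omega)
      obtain ⟨c, hc⟩ := Option.isSome_iff_exists.mp hk0.1
      obtain ⟨q, hq, hp1, hlast⟩ := pvLastAt_inv sequence network s j p c hpos hc
      obtain ⟨instr, row, hg, hrow, hnp⟩ := pvStepT_inv sequence network j p q hq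
      have hcz : c ≠ 'Z' := fun hcz => hk0.2 (hcz ▸ hc)
      have hzz : pvLastAt sequence network s ((j + 1) + d) = some 'Z' := by
        have he : (j + 1) + d = j + (d + 1) := by omega
        rw [he]; exact hz
      have hks' : ∀ k, j + 1 ≤ k → k < (j + 1) + d →
          (pvLastAt sequence network s k).isSome ∧ pvLastAt sequence network s k ≠ some 'Z' :=
        fun k h1 h2 => hks k (by omega) (by omega)
      have hrec := ih (j + 1) f' q (by omega) hp1 hzz hks'
      have hstep : pvGhostB sequence network (f' + 1) p j = pvGhostB sequence network f' q (j + 1) := by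
        simp only [pvGhostB, hg, hrow, hnp, hlast, if_neg hcz]
      rw [hstep, hrec]
      congr 1
      omega

-- ===== VERDICT (by name: the statement is the Claim_ definition above) =====
theorem walk_network_spec : Claim_equal_walk_network := by
  intro sequence network start_positions _ hpre
  obtain ⟨hseq, hpre2⟩ := hpre
  have hall : ∀ s ∈ start_positions, (pvGhostB sequence network (pvFuel sequence network) s 0).isSome := by
    intro s hs
    obtain ⟨n, hn, hz, hks⟩ := hpre2 s hs
    have hrun := pvGhostB_of_hits sequence network s n 0 (pvFuel sequence network) s hn (by simp [pvPosAt])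
      (by simpa using hz) (fun k _ hk => hks k (by omega))
    simp [hrun]
  unfold Spec_walk_network walk_network walk_network_alt
  obtain ⟨l, hl, hperm⟩ :=
    pvLoopA_spec sequence network hseq
      ((network.flatMap (fun r => r.2)).length * sequence.length) 0 [] start_positions hall
  have hrun := pvRunAllB_spec sequence network (pvFuel sequence network) start_positions [] hall
  rw [show pvFuel sequence network
      = (network.flatMap (fun r => r.2)).length * sequence.length + 1 from rfl] at hrun
  rw [show pvFuel sequence network
      = (network.flatMap (fun r => r.2)).length * sequence.length + 1 from rfl]
  simp only [hl, hrun]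
  rw [pv_foldl_lcm_perm hperm]
  simp only [List.nil_append]
  rw [List.foldl_map, List.foldl_map]
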